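-- pv_equiv track=rewrite | github.com/Gerson2102/portafolio1 | partirLista variación.py | partirListaAux
-- ===== SOURCE A (Python) =====
-- def partirListaAux (p_lista, p_sublista, p_lista_negativos, p_resultado):
--     if p_lista == []:
--         if p_sublista == []:
--             return p_resultado + [p_lista_negativos]
--         else:
--             return p_resultado + [p_sublista] + [p_lista_negativos]
--     elif p_lista [0] >= 0:
--         return partirListaAux (p_lista [1:], p_sublista + [p_lista [0]], p_lista_negativos, p_resultado)
--     else:
--         return partirListaAux (p_lista [1:], [], p_lista_negativos + [p_lista [0]], p_resultado + [p_sublista])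
-- ===== SOURCE B (Python) =====
-- def partirListaAux(p_lista, p_sublista, p_lista_negativos, p_resultado):
--     resultado = list(p_resultado)
--     run = list(p_sublista)
--     negativos = list(p_lista_negativos)
--     for x in p_lista:
--         if x >= 0:
--             run.append(x)
--         else:
--             resultado.append(run)
--             run = []
--             negativos.append(x)
--     if run:
--         resultado.append(run)
--     resultado.append(negativos)
--     return resultado
-- ===== Notes on version B (the rewrite author's own statement) =====
-- stated objective: faster
-- what changed: Replaced the recursion whose every step rebuilds lists by concatenation (quadratic) with a single iterative for-loop over the input using three local append-only accumulators and a final flush.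
import Mathlib
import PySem

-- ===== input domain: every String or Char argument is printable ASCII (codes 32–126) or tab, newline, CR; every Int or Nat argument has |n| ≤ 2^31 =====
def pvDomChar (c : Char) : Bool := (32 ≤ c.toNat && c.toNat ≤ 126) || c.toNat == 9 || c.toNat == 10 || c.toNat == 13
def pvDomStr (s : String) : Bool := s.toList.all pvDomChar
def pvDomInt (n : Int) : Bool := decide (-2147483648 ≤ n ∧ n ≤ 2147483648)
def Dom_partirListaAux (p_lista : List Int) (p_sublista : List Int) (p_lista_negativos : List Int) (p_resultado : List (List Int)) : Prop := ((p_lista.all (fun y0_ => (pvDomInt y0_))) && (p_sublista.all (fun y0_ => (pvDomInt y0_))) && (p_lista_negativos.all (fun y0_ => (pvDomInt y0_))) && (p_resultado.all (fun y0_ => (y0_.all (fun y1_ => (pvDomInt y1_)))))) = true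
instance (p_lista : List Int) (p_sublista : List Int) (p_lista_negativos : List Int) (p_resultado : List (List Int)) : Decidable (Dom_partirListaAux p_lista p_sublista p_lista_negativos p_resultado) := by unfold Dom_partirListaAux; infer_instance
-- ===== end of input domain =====

-- B replaces A's recursion by an iterative fold over the list with three accumulators (return value only; A mutates nothing).
-- ===== PORT A =====
def partirListaAux (p_lista : List Int) (p_sublista : List Int) (p_lista_negativos : List Int) (p_resultado : List (List Int)) : List (List Int) :=
  match p_lista with
  | [] =>
      if p_sublista = [] then p_resultado ++ [p_lista_negativos]
      else p_resultado ++ [p_sublista] ++ [p_lista_negativos]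
  | x :: rest =>
      if x ≥ 0 then partirListaAux rest (p_sublista ++ [x]) p_lista_negativos p_resultado
      else partirListaAux rest [] (p_lista_negativos ++ [x]) (p_resultado ++ [p_sublista])

-- ===== PORT B =====
def pvAltStep (st : List (List Int) × List Int × List Int) (x : Int) : List (List Int) × List Int × List Int :=
  if x ≥ 0 then (st.1, st.2.1 ++ [x], st.2.2)
  else (st.1 ++ [st.2.1], [], st.2.2 ++ [x])

def partirListaAux_alt (p_lista : List Int) (p_sublista : List Int) (p_lista_negativos : List Int) (p_resultado : List (List Int)) : List (List Int) :=
  let st := p_lista.foldl pvAltStep (p_resultado, p_sublista, p_lista_negativos)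
  (if st.2.1 = [] then st.1 else st.1 ++ [st.2.1]) ++ [st.2.2]

-- ===== PRECONDITION & SPEC =====
def Spec_partirListaAux (p_lista : List Int) (p_sublista : List Int) (p_lista_negativos : List Int) (p_resultado : List (List Int)) (out : List (List Int)) : Prop := out = partirListaAux_alt p_lista p_sublista p_lista_negativos p_resultado
instance (p_lista : List Int) (p_sublista : List Int) (p_lista_negativos : List Int) (p_resultado : List (List Int)) (out : List (List Int)) : Decidable (Spec_partirListaAux p_lista p_sublista p_lista_negativos p_resultado out) := by unfold Spec_partirListaAux; infer_instance

-- ===== CLAIM (what is proved, stated in full; the proofs are below) =====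
def Claim_equal_partirListaAux : Prop := ∀ (p_lista : List Int) (p_sublista : List Int) (p_lista_negativos : List Int) (p_resultado : List (List Int)), Dom_partirListaAux p_lista p_sublista p_lista_negativos p_resultado → Spec_partirListaAux p_lista p_sublista p_lista_negativos p_resultado (partirListaAux p_lista p_sublista p_lista_negativos p_resultado)

-- ===== LEMMAS AND PROOFS =====

-- ===== VERDICT (by name: the statement is the Claim_ definition above) =====
theorem pv_main (l s n : List Int) (r : List (List Int)) :
    partirListaAux l s n r = partirListaAux_alt l s n r := by
  induction l generalizing s n r with
  | nil => simp [partirListaAux, partirListaAux_alt]; split_ifs <;> simp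
  | cons x rest ih =>
      by_cases h : x ≥ 0 <;>
        simp [partirListaAux, partirListaAux_alt, h, ih, pvAltStep]

theorem partirListaAux_spec : Claim_equal_partirListaAux := by
  intro l s n r _
  unfold Spec_partirListaAux
  exact pv_main l s n r
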